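-- pv_equiv track=rewrite | github.com/rodrigodalri/BGPstability | BGPstability_new.py | msgPrefix
-- ===== SOURCE A (Python) =====
-- def msgPrefix(_prefix, _msglist):
--
--     msglist = _msglist
--     prefix = _prefix
--
--     countWithdrawn = 0
--     countAnnouncement = 0
--
--     for i in msglist:
--         list = i["prefix"].split(';')
--         for k in range(0,len(list)-1,2):
--             if prefix == list[k]+';'+list[k+1]:
--                 if i["type"] == 'a':
--                     countAnnouncement = countAnnouncement + 1
--                 else:
--                     countWithdrawn = countWithdrawn +1
--
--     return (countAnnouncement,countWithdrawn)
-- ===== SOURCE B (Python) =====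
-- def _pairs(parts):
--     if len(parts) < 2:
--         return []
--     return [(parts[0], parts[1])] + _pairs(parts[2:])
--
--
-- def msgPrefix(_prefix, _msglist):
--     target = _prefix.split(';')
--     if len(target) != 2:
--         return (0, 0)
--     a, b = target
--     ann = 0
--     wd = 0
--     for m in _msglist:
--         c = sum(1 for x, y in _pairs(m["prefix"].split(';')) if x == a and y == b)
--         if c:
--             if m["type"] == 'a':
--                 ann += c
--             else:
--                 wd += c
--     return (ann, wd)
-- ===== Notes on version B (the rewrite author's own statement) =====
-- stated objective: alternative
-- what changed: B parses the queried prefix once into its two ';'-separated tokens (returning (0,0) immediately when it does not have exactly two), builds each message's adjacent pairs with a recursive helper, counts matches by token comparison instead of building and comparing concatenated strings, and classifies each message once by type after counting rather than branching on type at every match.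
import Mathlib
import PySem

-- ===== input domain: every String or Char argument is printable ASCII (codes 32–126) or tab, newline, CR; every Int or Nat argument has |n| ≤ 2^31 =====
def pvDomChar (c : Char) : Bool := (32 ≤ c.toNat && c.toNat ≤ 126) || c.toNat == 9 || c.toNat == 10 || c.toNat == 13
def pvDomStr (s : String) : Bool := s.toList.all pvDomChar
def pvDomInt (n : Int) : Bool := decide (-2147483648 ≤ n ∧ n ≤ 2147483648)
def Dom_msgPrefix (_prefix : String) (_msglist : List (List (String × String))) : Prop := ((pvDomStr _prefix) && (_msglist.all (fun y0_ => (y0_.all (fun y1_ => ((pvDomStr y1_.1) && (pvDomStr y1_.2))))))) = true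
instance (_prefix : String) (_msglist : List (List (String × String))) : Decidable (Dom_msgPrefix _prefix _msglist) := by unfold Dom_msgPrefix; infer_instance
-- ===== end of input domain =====

-- B parses the queried prefix once into its two ';'-tokens (early (0,0) if it has not exactly two),
-- builds adjacent pairs recursively and counts token-wise matches, classifying once per message
-- (objective: alternative algorithm; A's KeyError inputs are excluded by Pre_).


-- ===== PORT A =====
-- Literal port of A; strings are handled on the List Char side (PySem.Chars).
-- i["prefix"] / i["type"] are ported as getD with a default: exact under Pre_ (key present
-- whenever Python reads it); list[k] / list[k+1] as pyGetD (indices are in range by the range bound).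
def msgPrefix (_prefix : String) (_msglist : List (List (String × String))) : Int × Int :=
  let pfx := _prefix.toList
  _msglist.foldl (fun cnt i =>
    let lst := PySem.Chars.splitOn ((PySem.Dict.mk i).getD "prefix" "").toList [';']
    (PySem.List.pyRange 0 ((lst.length : Int) - 1) 2).foldl (fun cnt k =>
      if pfx = PySem.List.pyGetD lst k [] ++ [';'] ++ PySem.List.pyGetD lst (k + 1) [] then
        if (PySem.Dict.mk i).getD "type" "" = "a" then (cnt.1 + 1, cnt.2)
        else (cnt.1, cnt.2 + 1)
      else cnt) cnt) (0, 0)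

-- ===== PORT B =====
-- Literal port of Source B. _pairs: adjacent pairs of tokens, recursively (trailing unpaired token dropped).
def pvPairsB : List (List Char) → List (List Char × List Char)
  | a :: b :: rest => (a, b) :: pvPairsB rest
  | _ => []

-- Source B: split the target once; if it has not exactly two tokens return (0,0); otherwise loop
-- over messages, count token-wise pair matches, and classify the count by the message type.
def msgPrefix_alt (_prefix : String) (_msglist : List (List (String × String))) : Int × Int :=
  match PySem.Chars.splitOn _prefix.toList [';'] with
  | [a, b] =>
    _msglist.foldl (fun acc m =>
      let c : Int :=
        (pvPairsB (PySem.Chars.splitOn ((PySem.Dict.mk m).getD "prefix" "").toList [';'])).foldl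
          (fun s p => if p.1 = a ∧ p.2 = b then s + 1 else s) 0
      if c ≠ 0 then
        if (PySem.Dict.mk m).getD "type" "" = "a" then (acc.1 + c, acc.2)
        else (acc.1, acc.2 + c)
      else acc) (0, 0)
  | _ => (0, 0)

-- ===== PRECONDITION & SPEC =====
-- the adjacent ';'-joined pairs of a split prefix field (the trailing unpaired token is dropped)
def pvPairs : List (List Char) → List (List Char)
  | a :: b :: rest => (a ++ [';'] ++ b) :: pvPairs rest
  | _ => []

-- Pre_ excludes exactly the inputs where Python A raises KeyError: a message without a
-- "prefix" key, or a message whose pair list matches _prefix but which has no "type" key.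
def Pre_msgPrefix (_prefix : String) (_msglist : List (List (String × String))) : Prop :=
  ∀ m ∈ _msglist,
    ((PySem.Dict.mk m).get? "prefix").isSome = true ∧
    (_prefix.toList ∈
        pvPairs (PySem.Chars.splitOn ((PySem.Dict.mk m).getD "prefix" "").toList [';']) →
      ((PySem.Dict.mk m).get? "type").isSome = true)
instance (_prefix : String) (_msglist : List (List (String × String))) : Decidable (Pre_msgPrefix _prefix _msglist) := by unfold Pre_msgPrefix; infer_instance

def pvWitness_msgPrefix : String × (List (List (String × String))) :=
  ("a;b", [[("prefix", "a;b"), ("type", "a")], [("prefix", "c;d;a;b"), ("type", "w")]])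

def Spec_msgPrefix (_prefix : String) (_msglist : List (List (String × String))) (out : Int × Int) : Prop := out = msgPrefix_alt _prefix _msglist
instance (_prefix : String) (_msglist : List (List (String × String))) (out : Int × Int) : Decidable (Spec_msgPrefix _prefix _msglist out) := by unfold Spec_msgPrefix; infer_instance

-- ===== CLAIM (what is proved, stated in full; the proofs are below) =====
def Claim_equal_msgPrefix : Prop := ∀ (_prefix : String) (_msglist : List (List (String × String))), Dom_msgPrefix _prefix _msglist → Pre_msgPrefix _prefix _msglist → Spec_msgPrefix _prefix _msglist (msgPrefix _prefix _msglist)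

-- ===== LEMMAS AND PROOFS =====

-- ---- a from-scratch model of PySem.Chars.splitOn with separator ";" ----
def pvSp : List Char → List (List Char)
  | [] => [[]]
  | c :: rest =>
      if c = ';' then [] :: pvSp rest
      else match pvSp rest with
        | p :: ps => (c :: p) :: ps
        | [] => [[c]]

lemma pvSp_ne_nil : ∀ (s : List Char), pvSp s ≠ []
  | [] => by simp [pvSp]
  | c :: rest => by
    simp only [pvSp]
    split
    · simp
    · split <;> simp

lemma pvGo_eq : ∀ (fuel : Nat) (l cur : List Char) (acc : List (List Char)), l.length ≤ fuel →
    PySem.Chars.splitOn.go [';'] fuel l cur acc =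
      acc.reverse ++ (match pvSp l with
        | p :: ps => (cur.reverse ++ p) :: ps
        | [] => [])
  | 0, l, cur, acc, h => by
    have : l = [] := by cases l <;> simp_all
    subst this
    simp [PySem.Chars.splitOn.go, pvSp]
  | fuel + 1, [], cur, acc, h => by
    simp [PySem.Chars.splitOn.go, pvSp]
  | fuel + 1, c :: rest, cur, acc, h => by
    rw [PySem.Chars.splitOn.go]
    by_cases hc : c = ';'
    · subst hc
      have hpre : List.isPrefixOf [';'] (';' :: rest) = true := by simp [List.isPrefixOf]
      simp only [hpre, if_true, List.length_cons, List.drop_succ_cons, List.length_nil,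
        List.drop_zero]
      rw [pvGo_eq fuel rest [] (cur.reverse :: acc) (by simpa using h)]
      simp only [pvSp, if_true]
      cases hsp : pvSp rest with
      | nil => exact absurd hsp (pvSp_ne_nil rest)
      | cons p ps => simp
    · have hpre : List.isPrefixOf [';'] (c :: rest) = false := by
        simp [List.isPrefixOf]; exact fun h' => hc h'.symm
      simp only [hpre, Bool.false_eq_true, if_false]
      rw [pvGo_eq fuel rest (c :: cur) acc (by simpa using h)]
      simp only [pvSp, if_neg hc]
      cases hsp : pvSp rest with
      | nil => exact absurd hsp (pvSp_ne_nil rest)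
      | cons p ps => simp

lemma splitOn_eq_pvSp (s : List Char) : PySem.Chars.splitOn s [';'] = pvSp s := by
  rw [PySem.Chars.splitOn, pvGo_eq (s.length + 1) s [] [] (by omega)]
  cases hsp : pvSp s with
  | nil => exact absurd hsp (pvSp_ne_nil s)
  | cons p ps => simp

lemma pvSp_sep_notMem : ∀ {s x : List Char}, x ∈ pvSp s → ';' ∉ x := by
  intro s
  induction s with
  | nil => intro x hx; simp [pvSp] at hx; simp [hx]
  | cons c rest ih =>
    intro x hx
    by_cases hc : c = ';'
    · subst hc
      simp only [pvSp, if_true, List.mem_cons] at hx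
      rcases hx with h | h
      · simp [h]
      · exact ih h
    · simp only [pvSp, if_neg hc] at hx
      cases hsp : pvSp rest with
      | nil => exact absurd hsp (pvSp_ne_nil rest)
      | cons p ps =>
        rw [hsp] at hx
        rcases List.mem_cons.1 hx with h | h
        · subst h
          intro hm
          rcases List.mem_cons.1 hm with h' | h'
          · exact hc h'.symm
          · exact ih (by rw [hsp]; exact List.mem_cons_self) h'
        · exact ih (by rw [hsp]; exact List.mem_cons_of_mem _ h)

lemma pvSp_of_notMem : ∀ {s : List Char}, ';' ∉ s → pvSp s = [s] := by
  intro s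
  induction s with
  | nil => intro; rfl
  | cons c rest ih =>
    intro h
    have hc : c ≠ ';' := fun e => h (by simp [e])
    have hr : ';' ∉ rest := fun m => h (List.mem_cons_of_mem _ m)
    simp only [pvSp, if_neg hc, ih hr]

lemma pvSp_append : ∀ {x : List Char} (y : List Char), ';' ∉ x → pvSp (x ++ ';' :: y) = x :: pvSp y := by
  intro x
  induction x with
  | nil => intro y _; simp [pvSp]
  | cons c rest ih =>
    intro y h
    have hc : c ≠ ';' := fun e => h (by simp [e])
    have hr : ';' ∉ rest := fun m => h (List.mem_cons_of_mem _ m)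
    simp only [List.cons_append, pvSp, if_neg hc, ih y hr]

def pvJoin : List (List Char) → List Char
  | [] => []
  | [x] => x
  | x :: y :: xs => x ++ ';' :: pvJoin (y :: xs)

lemma pvJoin_pvSp : ∀ (s : List Char), pvJoin (pvSp s) = s := by
  intro s
  induction s with
  | nil => rfl
  | cons c rest ih =>
    by_cases hc : c = ';'
    · subst hc
      simp only [pvSp, if_true]
      cases hsp : pvSp rest with
      | nil => exact absurd hsp (pvSp_ne_nil rest)
      | cons p ps =>
        rw [hsp] at ih
        simpa [pvJoin] using ih
    · simp only [pvSp, if_neg hc]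
      cases hsp : pvSp rest with
      | nil => exact absurd hsp (pvSp_ne_nil rest)
      | cons p ps =>
        rw [hsp] at ih
        cases ps with
        | nil => simpa [pvJoin] using congrArg (c :: ·) ih
        | cons q qs => simpa [pvJoin] using congrArg (c :: ·) ih

lemma pvKey {x y pfx : List Char} (hx : ';' ∉ x) (hy : ';' ∉ y) :
    pfx = x ++ [';'] ++ y ↔ pvSp pfx = [x, y] := by
  constructor
  · intro h
    subst h
    have : x ++ [';'] ++ y = x ++ ';' :: y := by simp
    rw [this, pvSp_append y hx, pvSp_of_notMem hy]
  · intro h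
    have := pvJoin_pvSp pfx
    rw [h] at this
    simp [pvJoin] at this
    simp [← this]

-- ---- pairing: A's stride-2 index range equals B's recursive pair list ----
lemma pvRange_cons (n : Nat) :
    PySem.List.pyRange 0 ((n : Int) + 1) 2 =
      0 :: (PySem.List.pyRange 0 ((n : Int) - 1) 2).map (· + 2) := by
  rw [PySem.List.pyRange_of_pos 0 ((n : Int) + 1) (by norm_num),
      PySem.List.pyRange_of_pos 0 ((n : Int) - 1) (by norm_num)]
  have h1 : (if (0:Int) < (n : Int) + 1 then (((n:Int) + 1 - 0 + 2 - 1) / 2).toNat else 0)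
      = (if (0:Int) < (n : Int) - 1 then (((n:Int) - 1 - 0 + 2 - 1) / 2).toNat else 0) + 1 := by
    split_ifs with h2 h3 <;> omega
  rw [h1, List.range_succ_eq_map]
  simp [List.map_map, Function.comp]
  intro a _
  trivial

lemma pvGetD_cons_shift (x : List Char) (xs : List (List Char)) (i : Int) (h : 0 ≤ i) :
    PySem.List.pyGetD (x :: xs) (i + 1) [] = PySem.List.pyGetD xs i [] := by
  rw [PySem.List.pyGetD_of_nonneg _ _ (by omega), PySem.List.pyGetD_of_nonneg _ _ h]
  have hi : (i + 1).toNat = i.toNat + 1 := by omega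
  simp [hi]

lemma pvMapT_eq : ∀ (lst : List (List Char)),
    (PySem.List.pyRange 0 ((lst.length : Int) - 1) 2).map
      (fun k => (PySem.List.pyGetD lst k [], PySem.List.pyGetD lst (k + 1) [])) =
    pvPairsB lst
  | [] => by
    have h : PySem.List.pyRange 0 ((0 : Int) - 1) 2 = [] := by decide
    simp only [List.length_nil, Nat.cast_zero, h, List.map_nil, pvPairsB]
  | [a] => by
    have h : PySem.List.pyRange 0 ((1 : Int) - 1) 2 = [] := by decide
    simp only [List.length_cons, List.length_nil, Nat.cast_one, zero_add, h, List.map_nil, pvPairsB]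
  | a :: b :: rest => by
    have hlen : (((a :: b :: rest).length : Int) - 1) = ((rest.length : Int)) + 1 := by
      simp only [List.length_cons]; push_cast; ring
    rw [hlen, pvRange_cons rest.length]
    simp only [List.map_cons, List.map_map]
    have h0 : PySem.List.pyGetD (a :: b :: rest) 0 [] = a := by
      simp [PySem.List.pyGetD_of_nonneg _ _ (by norm_num : (0:Int) ≤ 0)]
    have h1 : PySem.List.pyGetD (a :: b :: rest) (0 + 1) [] = b := by
      rw [pvGetD_cons_shift _ _ _ (by norm_num)]
      simp [PySem.List.pyGetD_of_nonneg _ _ (by norm_num : (0:Int) ≤ 0)]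
    rw [h0, h1]
    simp only [pvPairsB]
    congr 1
    rw [← pvMapT_eq rest]
    apply List.map_congr_left
    intro k hk
    have hk0 : 0 ≤ k := by
      have := (PySem.List.mem_pyRange_iff_of_pos (by norm_num : (0:Int) < 2) k).1 hk
      omega
    simp only [Function.comp]
    rw [show k + 2 + 1 = (k + 1) + 1 + 1 by ring]
    rw [show k + 2 = (k + 1) + 1 by ring]
    rw [pvGetD_cons_shift _ _ _ (by omega), pvGetD_cons_shift _ _ _ (by omega),
        pvGetD_cons_shift _ _ _ (by omega), pvGetD_cons_shift _ _ _ (by omega)]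

lemma pvPairsB_mem : ∀ {lst : List (List Char)} {x y : List Char},
    (x, y) ∈ pvPairsB lst → x ∈ lst ∧ y ∈ lst
  | a :: b :: rest, x, y, h => by
    simp only [pvPairsB, List.mem_cons, Prod.mk.injEq] at h
    rcases h with ⟨hx, hy⟩ | h
    · subst hx; subst hy; simp
    · have := pvPairsB_mem h
      exact ⟨List.mem_cons_of_mem _ (List.mem_cons_of_mem _ this.1),
             List.mem_cons_of_mem _ (List.mem_cons_of_mem _ this.2)⟩
  | [], _, _, h => by simp [pvPairsB] at h
  | [a], _, _, h => by simp [pvPairsB] at h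

-- ---- fold / count bookkeeping ----
lemma pvFoldP_fst {α : Type} (P : α → Prop) [DecidablePred P] : ∀ (l : List α) (acc : Int × Int),
    l.foldl (fun a q => if P q then (a.1 + 1, a.2) else a) acc =
      (acc.1 + (l.countP (fun x => decide (P x)) : Int), acc.2)
  | [], acc => by simp
  | q :: l, acc => by
    rw [List.foldl_cons, pvFoldP_fst P l]
    by_cases h : P q <;> simp [h, List.countP_cons] <;> ring

lemma pvFoldP_snd {α : Type} (P : α → Prop) [DecidablePred P] : ∀ (l : List α) (acc : Int × Int),
    l.foldl (fun a q => if P q then (a.1, a.2 + 1) else a) acc =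
      (acc.1, acc.2 + (l.countP (fun x => decide (P x)) : Int))
  | [], acc => by simp
  | q :: l, acc => by
    rw [List.foldl_cons, pvFoldP_snd P l]
    by_cases h : P q <;> simp [h, List.countP_cons] <;> ring

lemma pvFoldSum {α : Type} (P : α → Prop) [DecidablePred P] : ∀ (l : List α) (s : Int),
    l.foldl (fun s p => if P p then s + 1 else s) s = s + (l.countP (fun x => decide (P x)) : Int)
  | [], s => by simp
  | q :: l, s => by
    rw [List.foldl_cons, pvFoldSum P l]
    by_cases h : P q <;> simp [h, List.countP_cons] <;> ring

lemma pvCount_congr {a b pfx sfield : List Char} (hp : pvSp pfx = [a, b]) :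
    (pvPairsB (pvSp sfield)).countP (fun p => decide (pfx = p.1 ++ [';'] ++ p.2)) =
    (pvPairsB (pvSp sfield)).countP (fun p => decide (p.1 = a ∧ p.2 = b)) := by
  apply List.countP_congr
  intro p hmem
  have hm := pvPairsB_mem (lst := pvSp sfield) (x := p.1) (y := p.2) (by simpa using hmem)
  have h1 := pvSp_sep_notMem hm.1
  have h2 := pvSp_sep_notMem hm.2
  have : pfx = p.1 ++ [';'] ++ p.2 ↔ (p.1 = a ∧ p.2 = b) := by
    rw [pvKey h1 h2, hp]
    constructor
    · intro h; injection h with h h'; injection h' with h' _; exact ⟨h.symm, h'.symm⟩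
    · rintro ⟨h, h'⟩; rw [h, h']
  simpa [decide_eq_decide] using this

lemma pvCount_zero {pfx sfield : List Char} (hp : ∀ a b : List Char, pvSp pfx ≠ [a, b]) :
    (pvPairsB (pvSp sfield)).countP (fun p => decide (pfx = p.1 ++ [';'] ++ p.2)) = 0 := by
  apply List.countP_eq_zero.mpr
  intro p hmem
  have hm := pvPairsB_mem (lst := pvSp sfield) (x := p.1) (y := p.2) (by simpa using hmem)
  have h1 := pvSp_sep_notMem hm.1
  have h2 := pvSp_sep_notMem hm.2
  simp only [decide_eq_true_eq]
  intro h
  exact hp p.1 p.2 ((pvKey h1 h2).1 h)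

-- A's per-message inner loop reduced to a count added to the type's coordinate
lemma pvStepA (pfx : List Char) (lst : List (List Char)) (t : String) (cnt : Int × Int) :
    (PySem.List.pyRange 0 ((lst.length : Int) - 1) 2).foldl (fun cnt k =>
      if pfx = PySem.List.pyGetD lst k [] ++ [';'] ++ PySem.List.pyGetD lst (k + 1) [] then
        if t = "a" then (cnt.1 + 1, cnt.2) else (cnt.1, cnt.2 + 1)
      else cnt) cnt =
    (let c : Int := (pvPairsB lst).countP (fun p => decide (pfx = p.1 ++ [';'] ++ p.2))
     if t = "a" then (cnt.1 + c, cnt.2) else (cnt.1, cnt.2 + c)) := by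
  by_cases ht : t = "a"
  · simp only [ht, if_true]
    rw [← List.foldl_map
      (f := fun k => (PySem.List.pyGetD lst k [], PySem.List.pyGetD lst (k + 1) []))
      (g := fun (a : Int × Int) (p : List Char × List Char) =>
        if pfx = p.1 ++ [';'] ++ p.2 then (a.1 + 1, a.2) else a),
      pvMapT_eq, pvFoldP_fst]
  · simp only [ht, if_false]
    rw [← List.foldl_map
      (f := fun k => (PySem.List.pyGetD lst k [], PySem.List.pyGetD lst (k + 1) []))
      (g := fun (a : Int × Int) (p : List Char × List Char) =>
        if pfx = p.1 ++ [';'] ++ p.2 then (a.1, a.2 + 1) else a),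
      pvMapT_eq, pvFoldP_snd]

lemma pvFoldl_ext {α β : Type} (f g : β → α → β) (h : ∀ b a, f b a = g b a) :
    ∀ (l : List α) (init : β), l.foldl f init = l.foldl g init
  | [], _ => rfl
  | a :: l, init => by rw [List.foldl_cons, List.foldl_cons, h, pvFoldl_ext f g h l]

lemma pvFoldl_const {α β : Type} (f : β → α → β) (h : ∀ b a, f b a = b) :
    ∀ (l : List α) (init : β), l.foldl f init = init
  | [], _ => rfl
  | a :: l, init => by rw [List.foldl_cons, h, pvFoldl_const f h l]

-- ===== VERDICT (by name: the statement is the Claim_ definition above) =====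
theorem msgPrefix_spec : Claim_equal_msgPrefix := by
  intro _prefix _msglist _hdom _hpre
  unfold Spec_msgPrefix msgPrefix msgPrefix_alt
  simp only [splitOn_eq_pvSp]
  cases hsp : pvSp _prefix.toList with
  | nil => exact absurd hsp (pvSp_ne_nil _)
  | cons a rest =>
    cases rest with
    | nil =>
      have hne : ∀ x y : List Char, pvSp _prefix.toList ≠ [x, y] := by
        intro x y h; rw [hsp] at h; simp at h
      refine pvFoldl_const _ (fun cnt i => ?_) _msglist (0, 0)
      rw [pvStepA, pvCount_zero hne]
      split <;> simp
    | cons b rest2 =>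
      cases rest2 with
      | nil =>
        refine pvFoldl_ext _ _ (fun cnt m => ?_) _msglist (0, 0)
        rw [pvStepA,
          pvFoldSum (fun p : List Char × List Char => p.1 = a ∧ p.2 = b), zero_add,
          pvCount_congr hsp]
        by_cases hc0 :
            ((pvPairsB (pvSp ((PySem.Dict.mk m).getD "prefix" "").toList)).countP
              (fun p => decide (p.1 = a ∧ p.2 = b)) : Int) = 0
        · rw [hc0]
          split <;> simp
        · rw [if_pos hc0]
      | cons c rest3 =>
        have hne : ∀ x y : List Char, pvSp _prefix.toList ≠ [x, y] := by
          intro x y h; rw [hsp] at h; simp at h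
        refine pvFoldl_const _ (fun cnt i => ?_) _msglist (0, 0)
        rw [pvStepA, pvCount_zero hne]
        split <;> simp
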